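-- pv_equiv track=rewrite | github.com/zsmalla/algorithm-jistudy-season1 | src/Programmers_HighScore_Kit/힙/디스크컨트롤러_python_임지수.py | solution
-- ===== SOURCE A (Python) =====
-- from heapq import heappush, heappop, heapify
--
-- def solution(jobs):
--     n = len(jobs)
--     heapify(jobs)
--     can_do = []
--     time, answer = 0, 0
--     while True:
--         while jobs and jobs[0][0] <= time:
--             request, process = heappop(jobs)
--             heappush(can_do, (process, request))
--
--         if not can_do and jobs:
--             time = jobs[0][0]
--             continue
--
--         if can_do:
--             process, request = heappop(can_do)
--             done = time + process
--             answer += (done - request)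
--             time = done
--         else:
--             break
--
--     return answer // n
-- ===== SOURCE B (Python) =====
-- def solution(jobs):
--     # Plain-list SJF: no heaps; arrival scan + linear min-by-(process, request)
--     # each round. Like A, this drains `jobs` (it is left empty on return).
--     n = len(jobs)
--     time = 0
--     answer = 0
--     ready = []
--     while jobs or ready:
--         still = []
--         for job in jobs:
--             if job[0] <= time:
--                 ready.append(job)
--             else:
--                 still.append(job)
--         jobs[:] = still
--         if not ready:
--             time = min(job[0] for job in jobs)
--             continue
--         request, process = min(ready, key=lambda j: (j[1], j[0]))
--         ready.remove([request, process])
--         answer += time + process - request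
--         time += process
--     return answer // n
-- ===== Notes on version B (the rewrite author's own statement) =====
-- stated objective: simpler
-- what changed: Replaces the two heaps (heapify/heappush/heappop) with plain lists: one arrival scan splits the pending list each round and a linear min with key (process, request) picks the next job, so no heap machinery is needed.
-- outside the precondition, e.g. on solution([]): A raises ZeroDivisionError, B raises ZeroDivisionError; on solution([[1, 2, 3]]): A raises ValueError, B raises ValueError
import Mathlib
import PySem

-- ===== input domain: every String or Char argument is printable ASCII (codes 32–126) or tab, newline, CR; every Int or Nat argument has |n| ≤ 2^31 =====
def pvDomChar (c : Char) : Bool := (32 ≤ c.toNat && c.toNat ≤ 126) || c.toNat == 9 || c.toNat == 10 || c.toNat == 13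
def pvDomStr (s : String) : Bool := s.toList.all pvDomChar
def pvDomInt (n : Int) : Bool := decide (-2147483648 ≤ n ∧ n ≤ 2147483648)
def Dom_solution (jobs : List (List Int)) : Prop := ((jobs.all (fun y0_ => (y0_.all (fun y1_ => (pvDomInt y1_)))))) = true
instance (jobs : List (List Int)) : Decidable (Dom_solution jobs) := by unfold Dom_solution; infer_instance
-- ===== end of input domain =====

-- B replaces A's two heaps with plain lists (arrival scan + linear min-by-(process,request))
-- for simplicity; equivalence is about the return value (both drain `jobs` in Python).

-- ===== PORT A =====
-- heapq model: the jobs heap yields its elements in ascending lexicographic order, so the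
-- inner `while jobs and jobs[0][0] <= time` pops exactly the jobs with request ≤ time
-- (a stable partition models that popped multiset), `jobs[0][0]` is the minimum request,
-- and `heappop(can_do)` returns the minimum (process, request) tuple of the heap's multiset.
def pvReqA (j : List Int) : Int := j.getD 0 0

def pvPairOfA (j : List Int) : Int × Int := (j.getD 1 0, j.getD 0 0)

-- Python tuple `<` (lexicographic) on 2-tuples
def pvTupLt (a b : Int × Int) : Bool := a.1 < b.1 || (a.1 == b.1 && a.2 < b.2)

def pvHeapMin (c : Int × Int) (cs : List (Int × Int)) : Int × Int :=
  cs.foldl (fun m y => if pvTupLt y m then y else m) c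

-- one fuel unit per iteration of A's `while True`; 2*n+1 always suffices (each continue
-- is followed by a scheduling step, and there are exactly n scheduling steps)
def solutionGo : Nat → List (List Int) → List (Int × Int) → Int → Int → Int
  | 0, _, _, _, answer => answer
  | fuel+1, jobs, canDo, time, answer =>
    let part := jobs.partition (fun j => pvReqA j ≤ time)
    match canDo ++ part.1.map pvPairOfA with
    | [] =>
      match part.2 with
      | [] => answer
      | r :: rs =>
        solutionGo fuel (r :: rs) [] (rs.foldl (fun a j => min a (pvReqA j)) (pvReqA r)) answer
    | c :: cs =>
      let m := pvHeapMin c cs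
      solutionGo fuel part.2 ((c :: cs).erase m) (time + m.1) (answer + (time + m.1 - m.2))

def solution (jobs : List (List Int)) : Int :=
  PySem.Int.floordiv (solutionGo (2 * jobs.length + 1) jobs [] 0 0) (jobs.length : Int)

-- ===== PORT B =====
-- Python `(j[1], j[0]) < (m[1], m[0])` for the min key
def pvKeyLtB (a b : List Int) : Bool :=
  a.getD 1 0 < b.getD 1 0 || (a.getD 1 0 == b.getD 1 0 && a.getD 0 0 < b.getD 0 0)

-- `min(ready, key=lambda j: (j[1], j[0]))`: first element with minimal key
def pvMinJobB (r : List Int) (rs : List (List Int)) : List Int :=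
  rs.foldl (fun m y => if pvKeyLtB y m then y else m) r

def solutionAltGo : Nat → List (List Int) → List (List Int) → Int → Int → Int
  | 0, _, _, _, answer => answer
  | fuel+1, jobs, ready, time, answer =>
    if jobs.isEmpty && ready.isEmpty then answer
    else
      -- the `for job in jobs` arrival scan building ready/still
      let arr := jobs.foldl
        (fun (acc : List (List Int) × List (List Int)) job =>
          if job.getD 0 0 ≤ time then (acc.1 ++ [job], acc.2) else (acc.1, acc.2 ++ [job]))
        (ready, [])
      match arr.1 with
      | [] =>
        match arr.2 with
        | [] => answer  -- unreachable: the while-condition held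
        | r :: rs =>
          solutionAltGo fuel (r :: rs) [] (rs.foldl (fun a j => min a (j.getD 0 0)) (r.getD 0 0)) answer
      | r :: rs =>
        let m := pvMinJobB r rs
        solutionAltGo fuel arr.2 ((r :: rs).erase m)
          (time + m.getD 1 0) (answer + (time + m.getD 1 0 - m.getD 0 0))

def solution_alt (jobs : List (List Int)) : Int :=
  PySem.Int.floordiv (solutionAltGo (2 * jobs.length + 1) jobs [] 0 0) (jobs.length : Int)

-- ===== PRECONDITION & SPEC =====
-- Pre_ excludes exactly the inputs where A raises: `jobs = []` (ZeroDivisionError in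
-- `answer // n`) and rows whose length is not 2 (unpacking `request, process = heappop(...)`
-- raises ValueError, and `jobs[0][0]` IndexError on an empty row).
def Pre_solution (jobs : List (List Int)) : Prop :=
  jobs ≠ [] ∧ ∀ j ∈ jobs, j.length = 2

instance (jobs : List (List Int)) : Decidable (Pre_solution jobs) := by
  unfold Pre_solution; infer_instance

def pvWitness_solution : List (List Int) := [[0, 3], [1, 9], [2, 6]]

def Spec_solution (jobs : List (List Int)) (out : Int) : Prop := out = solution_alt jobs
instance (jobs : List (List Int)) (out : Int) : Decidable (Spec_solution jobs out) := by unfold Spec_solution; infer_instance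

-- ===== CLAIM (what is proved, stated in full; the proofs are below) =====
def Claim_equal_solution : Prop := ∀ (jobs : List (List Int)), Dom_solution jobs → Pre_solution jobs → Spec_solution jobs (solution jobs)

-- ===== LEMMAS AND PROOFS =====

-- B's arrival fold is a stable partition
theorem pv_arrive_fold (time : Int) (jobs acc1 acc2 : List (List Int)) :
    jobs.foldl
      (fun (acc : List (List Int) × List (List Int)) job =>
        if job.getD 0 0 ≤ time then (acc.1 ++ [job], acc.2) else (acc.1, acc.2 ++ [job]))
      (acc1, acc2)
    = (acc1 ++ jobs.filter (fun j => decide (j.getD 0 0 ≤ time)),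
       acc2 ++ jobs.filter (fun j => !decide (j.getD 0 0 ≤ time))) := by
  induction jobs generalizing acc1 acc2 with
  | nil => simp
  | cons a t ih =>
    rw [List.foldl_cons]
    by_cases h : a.getD 0 0 ≤ time
    · rw [if_pos h, ih]
      rw [List.getD_eq_getElem?_getD] at h
      simp [h]
    · rw [if_neg h, ih]
      rw [List.getD_eq_getElem?_getD] at h
      simp [h]

theorem pv_pairOf_inj {a b : List Int} (ha : a.length = 2) (hb : b.length = 2)
    (h : pvPairOfA a = pvPairOfA b) : a = b := by
  obtain ⟨a0, a1, rfl⟩ := List.length_eq_two.mp ha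
  obtain ⟨b0, b1, rfl⟩ := List.length_eq_two.mp hb
  simp [pvPairOfA] at h
  simp [h.1, h.2]

theorem pv_min_map (r : List Int) (rs : List (List Int)) :
    pvHeapMin (pvPairOfA r) (rs.map pvPairOfA) = pvPairOfA (pvMinJobB r rs) := by
  induction rs generalizing r with
  | nil => rfl
  | cons a t ih =>
    have hk : pvTupLt (pvPairOfA a) (pvPairOfA r) = pvKeyLtB a r := rfl
    simp only [pvHeapMin, pvMinJobB, List.map_cons, List.foldl_cons, hk] at *
    by_cases h : pvKeyLtB a r = true <;> simp [h, ih]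

theorem pv_min_mem (r : List Int) (rs : List (List Int)) :
    pvMinJobB r rs ∈ r :: rs := by
  induction rs generalizing r with
  | nil => simp [pvMinJobB]
  | cons a t ih =>
    have : pvMinJobB r (a :: t) = pvMinJobB (if pvKeyLtB a r then a else r) t := rfl
    rw [this]
    have h2 := ih (if pvKeyLtB a r then a else r)
    rcases List.mem_cons.mp h2 with h' | h'
    · rw [h']; by_cases h : pvKeyLtB a r = true <;> simp [h]
    · simp [h']

theorem pv_erase_map (m : List Int) (hm : m.length = 2) :
    ∀ (l : List (List Int)), (∀ j ∈ l, j.length = 2) →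
    (l.map pvPairOfA).erase (pvPairOfA m) = (l.erase m).map pvPairOfA := by
  intro l
  induction l with
  | nil => simp
  | cons a t ih =>
    intro hl
    by_cases h : pvPairOfA a = pvPairOfA m
    · have : a = m := pv_pairOf_inj (hl a (by simp)) hm h
      simp [this]
    · have hne : a ≠ m := fun e => h (by rw [e])
      simp only [List.map_cons, List.erase_cons]
      rw [if_neg (by simpa using h), if_neg (by simpa using hne),
        ih (fun j hj => hl j (by simp [hj]))]
      simp

theorem pv_go_eq (fuel : Nat) :
    ∀ (jobs ready : List (List Int)) (time answer : Int),
    (∀ j ∈ jobs, j.length = 2) → (∀ j ∈ ready, j.length = 2) →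
    solutionGo fuel jobs (ready.map pvPairOfA) time answer
      = solutionAltGo fuel jobs ready time answer := by
  induction fuel with
  | zero => intro jobs ready time answer _ _; rfl
  | succ fuel ih =>
    intro jobs ready time answer hjobs hready
    by_cases hempty : jobs = [] ∧ ready = []
    · obtain ⟨rfl, rfl⟩ := hempty
      rfl
    · have hbe : (jobs.isEmpty && ready.isEmpty) = false := by
        rcases jobs with _ | ⟨a, t⟩ <;> rcases ready with _ | ⟨b, u⟩ <;> simp_all
      simp only [solutionGo, solutionAltGo, hbe, Bool.false_eq_true, if_false]
      rw [pv_arrive_fold,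
        show (fun j : List Int => decide (pvReqA j ≤ time))
            = (fun j => decide (j.getD 0 0 ≤ time)) from rfl]
      simp only [List.partition_eq_filter_filter, Function.comp_def, List.nil_append]
      rw [← List.map_append]
      rcases hR : ready ++ jobs.filter (fun j => decide (j.getD 0 0 ≤ time)) with _ | ⟨r, rs⟩
      · simp only [List.map_nil]
        rcases hG : jobs.filter (fun j => !decide (j.getD 0 0 ≤ time)) with _ | ⟨g, gs⟩
        · rw [hG]
        · rw [hG]
          exact ih (g :: gs) [] _ _
            (fun j hj => hjobs j (List.mem_of_mem_filter (hG ▸ hj))) (by simp)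
      · have hlen : ∀ j ∈ r :: rs, j.length = 2 := by
          intro j hj
          rw [← hR] at hj
          rcases List.mem_append.mp hj with h' | h'
          · exact hready j h'
          · exact hjobs j (List.mem_of_mem_filter h')
        have hm : pvMinJobB r rs ∈ r :: rs := pv_min_mem r rs
        simp only [List.map_cons]
        rw [show pvPairOfA r :: List.map pvPairOfA rs = (r :: rs).map pvPairOfA from rfl,
          show pvHeapMin (pvPairOfA r) (List.map pvPairOfA rs)
              = pvPairOfA (pvMinJobB r rs) from pv_min_map r rs,
          pv_erase_map (pvMinJobB r rs) (hlen _ hm) (r :: rs) hlen]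
        simp only [pvPairOfA]
        exact ih _ _ _ _
          (fun j hj => hjobs j (List.mem_of_mem_filter hj))
          (fun j hj => hlen j (List.erase_sublist.subset hj))

-- ===== VERDICT (by name: the statement is the Claim_ definition above) =====
theorem solution_spec : Claim_equal_solution := by
  intro jobs _ hpre
  unfold Spec_solution solution solution_alt
  rw [show ([] : List (Int × Int)) = ([] : List (List Int)).map pvPairOfA from rfl,
    pv_go_eq _ jobs [] 0 0 hpre.2 (by simp)]
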